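-- pv_equiv track=rewrite | github.com/AjCodez/Leetcode | getSubSequenceWithAscii.py | getSS
-- ===== SOURCE A (Python) =====
-- def getSS(s):
--     if s=='':
--         return ['']
--     cc=s[0]
--     ss=s[1:]
--     tres=getSS(ss)
--     res = []
--     for i in tres:
--         res.append(i)
--         res.append(cc+i)
--         res.append(str(ord(cc))+i)
--
--     return res
-- ===== SOURCE B (Python) =====
-- def getSS(s):
--     res = ['']
--     for c in reversed(s):
--         res = [x for i in res for x in (i, c + i, str(ord(c)) + i)]
--     return res
-- ===== Notes on version B (the rewrite author's own statement) =====
-- stated objective: alternative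
-- what changed: Recursion on the string tail replaced by an iterative loop over the characters in reverse order, rebuilding the result list in place with a flat comprehension instead of an append loop inside a recursive call.
import Mathlib
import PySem

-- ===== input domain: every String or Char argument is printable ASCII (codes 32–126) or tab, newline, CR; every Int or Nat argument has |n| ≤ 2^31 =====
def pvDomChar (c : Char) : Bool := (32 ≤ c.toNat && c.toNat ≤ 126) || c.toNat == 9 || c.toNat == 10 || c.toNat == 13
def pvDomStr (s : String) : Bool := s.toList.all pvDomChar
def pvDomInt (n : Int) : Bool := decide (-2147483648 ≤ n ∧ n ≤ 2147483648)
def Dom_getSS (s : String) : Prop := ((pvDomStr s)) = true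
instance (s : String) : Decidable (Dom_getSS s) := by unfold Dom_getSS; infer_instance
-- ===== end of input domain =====

-- B replaces A's recursion with an iterative reverse-order loop; objective: alternative decomposition (same cost).

-- ===== PORT A =====
-- literal port of A's recursion on the string's characters (s=='' test / s[0] / s[1:] = the list pattern match)
def getSSAux (l : List Char) : List String :=
  match l with
  | [] => [""]
  | cc :: ss =>
    let tres := getSSAux ss
    tres.foldl (fun res i =>
      res ++ [i, String.mk [cc] ++ i, PySem.Int.toStr (cc.toNat : Int) ++ i]) []

def getSS (s : String) : List String := getSSAux s.toList

-- ===== PORT B =====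
def getSS_alt (s : String) : List String :=
  s.toList.reverse.foldl (fun res c =>
    res.flatMap (fun i => [i, String.mk [c] ++ i, PySem.Int.toStr (c.toNat : Int) ++ i])) [""]

-- ===== PRECONDITION & SPEC =====
def Spec_getSS (s : String) (out : List String) : Prop := out = getSS_alt s
instance (s : String) (out : List String) : Decidable (Spec_getSS s out) := by unfold Spec_getSS; infer_instance

-- ===== CLAIM (what is proved, stated in full; the proofs are below) =====
def Claim_equal_getSS : Prop := ∀ (s : String), Dom_getSS s → Spec_getSS s (getSS s)

-- ===== LEMMAS AND PROOFS =====
theorem getSSAux_eq_foldr (l : List Char) :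
    getSSAux l = l.reverse.foldl (fun res c =>
      res.flatMap (fun i => [i, String.mk [c] ++ i, PySem.Int.toStr (c.toNat : Int) ++ i])) [""] := by
  induction l with
  | nil => rfl
  | cons cc ss ih =>
    simp only [getSSAux, List.reverse_cons, List.foldl_append, List.foldl_cons, List.foldl_nil, ← ih,
      PySem.List.foldl_append_eq_flatMap, List.nil_append]

-- ===== VERDICT (by name: the statement is the Claim_ definition above) =====
theorem getSS_spec : Claim_equal_getSS := by
  intro s _
  unfold Spec_getSS getSS getSS_alt
  exact getSSAux_eq_foldr s.toList
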